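-- pv_equiv track=rewrite | github.com/yoderj/five_n_plus_one | help_me.py | full_trace_2
-- ===== SOURCE A (Python) =====
-- def lookup(first_base, p2, sequence, shift, n):
--     if not n % first_base == sequence[0]:
--         return 0
--     n //= first_base
--     i = 1
--     if i == len(sequence):
--         return -1
--     while n % p2 == sequence[i]:
--         n //= p2
--         i += 1
--         if i == len(sequence):
--             return -1
--     return i + shift
--
-- def lookup_2(sequence, shift, n):
--     if not n % 2 == sequence[0]:
--         return 1 #2 always divides the answer
--     n //= 2
--     i = 1
--     if i == len(sequence):
--         return -1
--     while n % 2 == sequence[i]: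
--         n //= 2
--         i += 1
--         if i == len(sequence):
--             return -1
--     return i + shift
--
-- def full_trace_2(p1, ord_p2, sequence1, sequence2, shift1, shift2, number, current_string):
--     seen1 = set()
--     seen2=set()
--     if current_string == 1:
--         seen1.add(number)
--     else:
--         seen2.add(number)
--     while not number == 0:
--         if current_string == 1:
--             number = lookup_2(sequence1, shift1, number)
--             if number in seen2:
--                 return False
--             seen2.add(number)
--             current_string = 2
--         else:
--             number = lookup(ord_p2, p1, sequence2, shift2, number)
--             if number in seen1:
--                 return False
--             seen1.add(number)
--             current_string = 1
--     return True
-- ===== SOURCE B (Python) =====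
-- def lookup(first_base, p2, sequence, shift, n):
--     if not n % first_base == sequence[0]:
--         return 0
--     n //= first_base
--     i = 1
--     if i == len(sequence):
--         return -1
--     while n % p2 == sequence[i]:
--         n //= p2
--         i += 1
--         if i == len(sequence):
--             return -1
--     return i + shift
--
-- def lookup_2(sequence, shift, n):
--     if not n % 2 == sequence[0]:
--         return 1
--     n //= 2
--     i = 1
--     if i == len(sequence):
--         return -1
--     while n % 2 == sequence[i]:
--         n //= 2
--         i += 1
--         if i == len(sequence):
--             return -1
--     return i + shift
--
-- def full_trace_2(p1, ord_p2, sequence1, sequence2, shift1, shift2, number, current_string):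
--     # No visited-sets: after the first step every state lies in a finite pool of
--     # len(sequence1)+len(sequence2)+6 states, so the trace either reaches 0 within
--     # that many steps or is trapped in a cycle and never reaches 0 at all.
--     on_first = current_string == 1
--     for _ in range(len(sequence1) + len(sequence2) + 6):
--         if number == 0:
--             return True
--         if on_first:
--             number = lookup_2(sequence1, shift1, number)
--         else:
--             number = lookup(ord_p2, p1, sequence2, shift2, number)
--         on_first = not on_first
--     return number == 0
-- ===== Notes on version B (the rewrite author's own statement) =====
-- stated objective: simpler
-- what changed: A detects revisits with two growing seen-sets (one per current_string parity); B drops the sets entirely and just iterates the alternating lookup step a fixed len(sequence1)+len(sequence2)+6 times, returning whether 0 was reached -- correct because after the first step every state lies in a finite pool of that size, so the trace either reaches 0 within the bound or is trapped in a 0-free cycle.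
-- outside the precondition, e.g. on full_trace_2(5, 0, [0, 0], [1], -1, 0, 2, 1): A returns True, B returns True; on full_trace_2(0, 3, [1], [1, 1], 0, 0, 1, 1): A returns True, B returns True
import Mathlib
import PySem

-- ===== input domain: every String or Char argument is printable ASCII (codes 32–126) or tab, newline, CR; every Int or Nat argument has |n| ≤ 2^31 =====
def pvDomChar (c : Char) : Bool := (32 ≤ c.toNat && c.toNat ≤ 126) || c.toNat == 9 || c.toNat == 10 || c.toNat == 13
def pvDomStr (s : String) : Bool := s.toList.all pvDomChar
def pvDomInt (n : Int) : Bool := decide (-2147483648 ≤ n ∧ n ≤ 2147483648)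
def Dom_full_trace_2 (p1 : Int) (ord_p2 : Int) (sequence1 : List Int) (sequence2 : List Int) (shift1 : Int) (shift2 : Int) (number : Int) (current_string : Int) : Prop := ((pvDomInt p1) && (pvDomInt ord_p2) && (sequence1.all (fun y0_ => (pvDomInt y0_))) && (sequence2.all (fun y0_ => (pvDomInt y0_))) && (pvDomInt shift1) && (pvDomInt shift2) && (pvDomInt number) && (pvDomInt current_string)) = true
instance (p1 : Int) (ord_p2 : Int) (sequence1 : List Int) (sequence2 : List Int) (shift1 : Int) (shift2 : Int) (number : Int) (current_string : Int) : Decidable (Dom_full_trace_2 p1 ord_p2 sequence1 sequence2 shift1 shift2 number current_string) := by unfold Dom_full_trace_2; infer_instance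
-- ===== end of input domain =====

-- B replaces A's two visited-sets by a plain bounded iteration (len1+len2+6 steps): after the
-- first step every state lies in a finite pool of that size, so the trace reaches 0 within the
-- bound or is trapped in a cycle and never reaches 0; objective: simpler (no sets maintained).

-- ===== PORT A =====

-- sequence[0] (Python raises IndexError on an empty sequence; Pre_ excludes reaching that)
def pvSeqGet (seq : List Int) (i : Nat) : Int := (PySem.List.pyGet? seq (i : Int)).getD 0

-- the shared 'while n % p2 == sequence[i]: …' loop body of lookup / lookup_2 (textually
-- identical in both Python helpers); entered with i < len(sequence) whenever Python does not raise
def lookupLoopA (p2 : Int) (seq : List Int) (shift : Int) (n : Int) (i : Nat) : Int :=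
  if h : i < seq.length then
    if PySem.Int.mod n p2 = seq[i] then
      if i + 1 = seq.length then -1
      else lookupLoopA p2 seq shift (PySem.Int.floordiv n p2) (i + 1)
    else (i : Int) + shift
  else -1  -- unreachable from Python-returning inputs (Python raises IndexError); totality guard
termination_by seq.length - i
decreasing_by omega

def lookupA (first_base : Int) (p2 : Int) (seq : List Int) (shift : Int) (n : Int) : Int :=
  if ¬ (PySem.Int.mod n first_base = pvSeqGet seq 0) then 0
  else
    if 1 = seq.length then -1
    else lookupLoopA p2 seq shift (PySem.Int.floordiv n first_base) 1

def lookup_2A (seq : List Int) (shift : Int) (n : Int) : Int :=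
  if ¬ (PySem.Int.mod n 2 = pvSeqGet seq 0) then 1
  else
    if 1 = seq.length then -1
    else lookupLoopA 2 seq shift (PySem.Int.floordiv n 2) 1

-- A's while loop over the two seen-sets; fuel len1+len2+8 is proved sufficient below
def ftLoopA (p1 ord_p2 : Int) (sequence1 sequence2 : List Int) (shift1 shift2 : Int) :
    Nat → PySem.Set Int → PySem.Set Int → Int → Bool → Bool
  | 0, _, _, _, _ => false
  | m + 1, seen1, seen2, number, s1 =>
    if number = 0 then true
    else if s1 then
      let nn := lookup_2A sequence1 shift1 number
      if PySem.Set.contains seen2 nn then false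
      else ftLoopA p1 ord_p2 sequence1 sequence2 shift1 shift2 m seen1 (PySem.Set.add seen2 nn) nn false
    else
      let nn := lookupA ord_p2 p1 sequence2 shift2 number
      if PySem.Set.contains seen1 nn then false
      else ftLoopA p1 ord_p2 sequence1 sequence2 shift1 shift2 m (PySem.Set.add seen1 nn) seen2 nn true

def full_trace_2 (p1 : Int) (ord_p2 : Int) (sequence1 : List Int) (sequence2 : List Int) (shift1 : Int) (shift2 : Int) (number : Int) (current_string : Int) : Bool :=
  let s1 : Bool := decide (current_string = 1)
  let seen1 : PySem.Set Int := if s1 then PySem.Set.add PySem.Set.empty number else PySem.Set.empty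
  let seen2 : PySem.Set Int := if s1 then PySem.Set.empty else PySem.Set.add PySem.Set.empty number
  ftLoopA p1 ord_p2 sequence1 sequence2 shift1 shift2
    (sequence1.length + sequence2.length + 8) seen1 seen2 number s1

-- ===== PORT B =====

-- B's bounded for-loop: no seen-sets, just the alternating lookups for a fixed number of rounds
def ftLoopB (p1 ord_p2 : Int) (sequence1 sequence2 : List Int) (shift1 shift2 : Int) :
    Nat → Int → Bool → Bool
  | 0, number, _ => decide (number = 0)
  | m + 1, number, on_first =>
    if number = 0 then true
    else if on_first then
      ftLoopB p1 ord_p2 sequence1 sequence2 shift1 shift2 m (lookup_2A sequence1 shift1 number) false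
    else
      ftLoopB p1 ord_p2 sequence1 sequence2 shift1 shift2 m (lookupA ord_p2 p1 sequence2 shift2 number) true

def full_trace_2_alt (p1 : Int) (ord_p2 : Int) (sequence1 : List Int) (sequence2 : List Int) (shift1 : Int) (shift2 : Int) (number : Int) (current_string : Int) : Bool :=
  ftLoopB p1 ord_p2 sequence1 sequence2 shift1 shift2
    (sequence1.length + sequence2.length + 6) number (decide (current_string = 1))

-- ===== PRECONDITION & SPEC =====
-- Pre_ excludes inputs on which Python's lookups can hit an IndexError (empty sequence) or a
-- ZeroDivisionError (zero modulus); the first trace step is checked exactly (number = 0, and the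
-- 'mismatch on string 2' case that returns True before touching p1 or sequence1), while deeper
-- steps are over-approximated, so a few trace-dependent inputs where a bad parameter is never
-- actually touched are excluded although A returns there (see the cites in the claim).
def Pre_full_trace_2 (p1 : Int) (ord_p2 : Int) (sequence1 : List Int) (sequence2 : List Int) (shift1 : Int) (shift2 : Int) (number : Int) (current_string : Int) : Prop :=
  number = 0
  ∨ (current_string ≠ 1 ∧ sequence2 ≠ [] ∧ ord_p2 ≠ 0 ∧ PySem.Int.mod number ord_p2 ≠ sequence2.headI)
  ∨ (sequence1 ≠ [] ∧ sequence2 ≠ [] ∧ ord_p2 ≠ 0 ∧ (2 ≤ sequence2.length → p1 ≠ 0))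
instance (p1 : Int) (ord_p2 : Int) (sequence1 : List Int) (sequence2 : List Int) (shift1 : Int) (shift2 : Int) (number : Int) (current_string : Int) : Decidable (Pre_full_trace_2 p1 ord_p2 sequence1 sequence2 shift1 shift2 number current_string) := by unfold Pre_full_trace_2; infer_instance

def pvWitness_full_trace_2 : Int × Int × List Int × List Int × Int × Int × Int × Int := (3, 3, [1], [0, 1], 0, 0, 7, 1)

def Spec_full_trace_2 (p1 : Int) (ord_p2 : Int) (sequence1 : List Int) (sequence2 : List Int) (shift1 : Int) (shift2 : Int) (number : Int) (current_string : Int) (out : Bool) : Prop := out = full_trace_2_alt p1 ord_p2 sequence1 sequence2 shift1 shift2 number current_string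
instance (p1 : Int) (ord_p2 : Int) (sequence1 : List Int) (sequence2 : List Int) (shift1 : Int) (shift2 : Int) (number : Int) (current_string : Int) (out : Bool) : Decidable (Spec_full_trace_2 p1 ord_p2 sequence1 sequence2 shift1 shift2 number current_string out) := by unfold Spec_full_trace_2; infer_instance

-- ===== CLAIM (what is proved, stated in full; the proofs are below) =====
def Claim_equal_full_trace_2 : Prop := ∀ (p1 : Int) (ord_p2 : Int) (sequence1 : List Int) (sequence2 : List Int) (shift1 : Int) (shift2 : Int) (number : Int) (current_string : Int), Dom_full_trace_2 p1 ord_p2 sequence1 sequence2 shift1 shift2 number current_string → Pre_full_trace_2 p1 ord_p2 sequence1 sequence2 shift1 shift2 number current_string → Spec_full_trace_2 p1 ord_p2 sequence1 sequence2 shift1 shift2 number current_string (full_trace_2 p1 ord_p2 sequence1 sequence2 shift1 shift2 number current_string)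

-- ===== LEMMAS AND PROOFS =====

-- The one-round step on states (number, currently-on-string-1?)
def pvStep (p1 ord_p2 : Int) (s1 s2 : List Int) (h1 h2 : Int) (x : Int × Bool) : Int × Bool :=
  if x.2 then (lookup_2A s1 h1 x.1, false) else (lookupA ord_p2 p1 s2 h2 x.1, true)

def pvOrbit (p1 ord_p2 : Int) (s1 s2 : List Int) (h1 h2 : Int) (x0 : Int × Bool) (t : Nat) : Int × Bool :=
  (pvStep p1 ord_p2 s1 s2 h1 h2)^[t] x0

-- possible results of the shared while loop / of the two lookups
def pvCandLoop (len : Nat) (shift : Int) : List Int := -1 :: (List.range (len + 1)).map (fun (j : Nat) => (j : Int) + shift)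
def pvC1 (len : Nat) (shift : Int) : List Int := 1 :: pvCandLoop len shift
def pvC2 (len : Nat) (shift : Int) : List Int := 0 :: pvCandLoop len shift
def pvStates (s1 s2 : List Int) (h1 h2 : Int) : List (Int × Bool) :=
  (pvC1 s1.length h1).map (fun n => (n, false)) ++ (pvC2 s2.length h2).map (fun n => (n, true))

lemma lookupLoopA_mem (p2 : Int) (seq : List Int) (shift : Int) :
    ∀ i n, lookupLoopA p2 seq shift n i ∈ pvCandLoop seq.length shift := by
  intro i n
  fun_induction lookupLoopA p2 seq shift n i with
  | case1 n i h hc hl => simp [pvCandLoop]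
  | case2 n i h hc hl ih => exact ih
  | case3 n i h hc =>
      exact List.mem_cons_of_mem _ (List.mem_map_of_mem (List.mem_range.mpr (Nat.lt_succ_of_lt h)))
  | case4 n i h => simp [pvCandLoop]

lemma lookup_2A_mem (seq : List Int) (shift n : Int) :
    lookup_2A seq shift n ∈ pvC1 seq.length shift := by
  unfold lookup_2A
  split_ifs <;>
    first
      | exact List.mem_cons_self
      | exact List.mem_cons_of_mem _ List.mem_cons_self
      | exact List.mem_cons_of_mem _ (lookupLoopA_mem 2 seq shift 1 _)

lemma lookupA_mem (fb p2 : Int) (seq : List Int) (shift n : Int) :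
    lookupA fb p2 seq shift n ∈ pvC2 seq.length shift := by
  unfold lookupA
  split_ifs <;>
    first
      | exact List.mem_cons_self
      | exact List.mem_cons_of_mem _ List.mem_cons_self
      | exact List.mem_cons_of_mem _ (lookupLoopA_mem p2 seq shift 1 _)

lemma pvStep_mem (p1 ord_p2 : Int) (s1 s2 : List Int) (h1 h2 : Int) (x : Int × Bool) :
    pvStep p1 ord_p2 s1 s2 h1 h2 x ∈ pvStates s1 s2 h1 h2 := by
  unfold pvStep pvStates
  split_ifs with hb
  · exact List.mem_append_left _ (List.mem_map_of_mem (lookup_2A_mem s1 h1 x.1))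
  · exact List.mem_append_right _ (List.mem_map_of_mem (lookupA_mem ord_p2 p1 s2 h2 x.1))

lemma pvOrbit_succ (p1 ord_p2 : Int) (s1 s2 : List Int) (h1 h2 : Int) (x0 : Int × Bool) (t : Nat) :
    pvOrbit p1 ord_p2 s1 s2 h1 h2 x0 (t + 1) = pvStep p1 ord_p2 s1 s2 h1 h2 (pvOrbit p1 ord_p2 s1 s2 h1 h2 x0 t) := by
  simp [pvOrbit, Function.iterate_succ_apply']

lemma pvOrbit_mem (p1 ord_p2 : Int) (s1 s2 : List Int) (h1 h2 : Int) (x0 : Int × Bool) (t : Nat)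
    (ht : 1 ≤ t) : pvOrbit p1 ord_p2 s1 s2 h1 h2 x0 t ∈ pvStates s1 s2 h1 h2 := by
  obtain ⟨u, rfl⟩ := Nat.exists_eq_add_of_le ht
  rw [Nat.add_comm, pvOrbit_succ]
  exact pvStep_mem _ _ _ _ _ _ _

-- periodicity once a state repeats
lemma pvOrbit_periodic (p1 ord_p2 : Int) (s1 s2 : List Int) (h1 h2 : Int) (x0 : Int × Bool)
    {a b : Nat} (hab : a ≤ b)
    (heq : pvOrbit p1 ord_p2 s1 s2 h1 h2 x0 a = pvOrbit p1 ord_p2 s1 s2 h1 h2 x0 b) :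
    ∀ x, a ≤ x → pvOrbit p1 ord_p2 s1 s2 h1 h2 x0 (x + (b - a)) = pvOrbit p1 ord_p2 s1 s2 h1 h2 x0 x := by
  intro x hx
  obtain ⟨d, rfl⟩ := Nat.exists_eq_add_of_le hx
  have h1 : a + d + (b - a) = d + b := by omega
  unfold pvOrbit at *
  rw [h1, Function.iterate_add_apply, ← heq, ← Function.iterate_add_apply]
  congr 1
  omega

-- what a seen-set holds after round t: the numbers seen at rounds of the given parity
def pvSeenSpec (p1 ord_p2 : Int) (s1 s2 : List Int) (h1 h2 : Int) (x0 : Int × Bool)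
    (seen : List Int) (pv : Bool) (t : Nat) : Prop :=
  ∀ x : Int, x ∈ seen ↔ ∃ j, j ≤ t ∧ pvOrbit p1 ord_p2 s1 s2 h1 h2 x0 j = (x, pv)

-- A's loop returns true when the orbit reaches 0 before any state repeats
lemma runA_true (p1 ord_p2 : Int) (s1 s2 : List Int) (h1 h2 : Int) (x0 : Int × Bool) (u0 : Nat)
    (hz : (pvOrbit p1 ord_p2 s1 s2 h1 h2 x0 u0).1 = 0)
    (hdist : ∀ a b, a < b → b ≤ u0 → pvOrbit p1 ord_p2 s1 s2 h1 h2 x0 a ≠ pvOrbit p1 ord_p2 s1 s2 h1 h2 x0 b) :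
    ∀ fuel t seenT seenF, t ≤ u0 → u0 + 1 ≤ fuel + t →
      pvSeenSpec p1 ord_p2 s1 s2 h1 h2 x0 seenT true t →
      pvSeenSpec p1 ord_p2 s1 s2 h1 h2 x0 seenF false t →
      ftLoopA p1 ord_p2 s1 s2 h1 h2 fuel seenT seenF (pvOrbit p1 ord_p2 s1 s2 h1 h2 x0 t).1 (pvOrbit p1 ord_p2 s1 s2 h1 h2 x0 t).2 = true := by
  intro fuel
  induction fuel with
  | zero => intro t seenT seenF ht hfuel _ _; omega
  | succ m ih =>
    intro t seenT seenF ht hfuel hsT hsF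
    simp only [ftLoopA]
    by_cases h0 : (pvOrbit p1 ord_p2 s1 s2 h1 h2 x0 t).1 = 0
    · simp [h0]
    · have htlt : t < u0 := by
        rcases Nat.lt_or_ge t u0 with h | h
        · exact h
        · exact absurd (le_antisymm ht h ▸ hz) h0
      cases hpar : (pvOrbit p1 ord_p2 s1 s2 h1 h2 x0 t).2 with
      | false =>
        have hstep : pvOrbit p1 ord_p2 s1 s2 h1 h2 x0 (t + 1)
            = (lookupA ord_p2 p1 s2 h2 (pvOrbit p1 ord_p2 s1 s2 h1 h2 x0 t).1, true) := by
          rw [pvOrbit_succ]; unfold pvStep; rw [hpar]; simp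
        set nn := lookupA ord_p2 p1 s2 h2 (pvOrbit p1 ord_p2 s1 s2 h1 h2 x0 t).1 with hnn
        have hnotmem : nn ∉ seenT := by
          intro hmem
          obtain ⟨j, hj, hje⟩ := (hsT nn).mp hmem
          exact hdist j (t + 1) (by omega) (by omega) (by rw [hje, hstep])
        have hcont : PySem.Set.contains seenT nn = false := by
          rw [← Bool.not_eq_true]; intro hc
          exact hnotmem ((PySem.Set.contains_iff seenT nn).mp hc)
        have hsT' : pvSeenSpec p1 ord_p2 s1 s2 h1 h2 x0 (PySem.Set.add seenT nn) true (t + 1) := by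
          intro x
          rw [PySem.Set.mem_add]
          constructor
          · rintro (hx | rfl)
            · obtain ⟨j, hj, hje⟩ := (hsT x).mp hx; exact ⟨j, by omega, hje⟩
            · exact ⟨t + 1, le_refl _, by rw [hstep]⟩
          · rintro ⟨j, hj, hje⟩
            rcases Nat.lt_or_ge j (t + 1) with hlt | hge
            · exact Or.inl ((hsT x).mpr ⟨j, by omega, hje⟩)
            · have hj1 : j = t + 1 := by omega
              subst hj1
              rw [hstep] at hje
              exact Or.inr (by injection hje with e1 e2; exact e1.symm)
        have hsF' : pvSeenSpec p1 ord_p2 s1 s2 h1 h2 x0 seenF false (t + 1) := by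
          intro x
          rw [hsF x]
          constructor
          · rintro ⟨j, hj, hje⟩; exact ⟨j, by omega, hje⟩
          · rintro ⟨j, hj, hje⟩
            rcases Nat.lt_or_ge j (t + 1) with hlt | hge
            · exact ⟨j, by omega, hje⟩
            · have hj1 : j = t + 1 := by omega
              subst hj1
              rw [hstep] at hje
              exact absurd hje (by simp)
        have hrec := ih (t + 1) (PySem.Set.add seenT nn) seenF (by omega) (by omega) hsT' hsF'
        rw [hstep] at hrec
        simp only [h0, hpar, if_false, hcont, ← hnn] at *
        simpa using hrec
      | true =>
        have hstep : pvOrbit p1 ord_p2 s1 s2 h1 h2 x0 (t + 1)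
            = (lookup_2A s1 h1 (pvOrbit p1 ord_p2 s1 s2 h1 h2 x0 t).1, false) := by
          rw [pvOrbit_succ]; unfold pvStep; rw [hpar]; simp
        set nn := lookup_2A s1 h1 (pvOrbit p1 ord_p2 s1 s2 h1 h2 x0 t).1 with hnn
        have hnotmem : nn ∉ seenF := by
          intro hmem
          obtain ⟨j, hj, hje⟩ := (hsF nn).mp hmem
          exact hdist j (t + 1) (by omega) (by omega) (by rw [hje, hstep])
        have hcont : PySem.Set.contains seenF nn = false := by
          rw [← Bool.not_eq_true]; intro hc
          exact hnotmem ((PySem.Set.contains_iff seenF nn).mp hc)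
        have hsF' : pvSeenSpec p1 ord_p2 s1 s2 h1 h2 x0 (PySem.Set.add seenF nn) false (t + 1) := by
          intro x
          rw [PySem.Set.mem_add]
          constructor
          · rintro (hx | rfl)
            · obtain ⟨j, hj, hje⟩ := (hsF x).mp hx; exact ⟨j, by omega, hje⟩
            · exact ⟨t + 1, le_refl _, by rw [hstep]⟩
          · rintro ⟨j, hj, hje⟩
            rcases Nat.lt_or_ge j (t + 1) with hlt | hge
            · exact Or.inl ((hsF x).mpr ⟨j, by omega, hje⟩)
            · have hj1 : j = t + 1 := by omega
              subst hj1
              rw [hstep] at hje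
              exact Or.inr (by injection hje with e1 e2; exact e1.symm)
        have hsT' : pvSeenSpec p1 ord_p2 s1 s2 h1 h2 x0 seenT true (t + 1) := by
          intro x
          rw [hsT x]
          constructor
          · rintro ⟨j, hj, hje⟩; exact ⟨j, by omega, hje⟩
          · rintro ⟨j, hj, hje⟩
            rcases Nat.lt_or_ge j (t + 1) with hlt | hge
            · exact ⟨j, by omega, hje⟩
            · have hj1 : j = t + 1 := by omega
              subst hj1
              rw [hstep] at hje
              exact absurd hje (by simp)
        have hrec := ih (t + 1) seenT (PySem.Set.add seenF nn) (by omega) (by omega) hsT' hsF'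
        rw [hstep] at hrec
        simp only [h0, hpar, hcont, ← hnn] at *
        simpa using hrec

-- A's loop returns false when a state repeats before the orbit reaches 0
lemma runA_false (p1 ord_p2 : Int) (s1 s2 : List Int) (h1 h2 : Int) (x0 : Int × Bool) (a b : Nat)
    (hab : a < b)
    (heq : pvOrbit p1 ord_p2 s1 s2 h1 h2 x0 a = pvOrbit p1 ord_p2 s1 s2 h1 h2 x0 b)
    (hmin : ∀ y, y < b → ∀ x, x < y → pvOrbit p1 ord_p2 s1 s2 h1 h2 x0 x ≠ pvOrbit p1 ord_p2 s1 s2 h1 h2 x0 y)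
    (hnz : ∀ j, j < b → (pvOrbit p1 ord_p2 s1 s2 h1 h2 x0 j).1 ≠ 0) :
    ∀ fuel t seenT seenF, t < b → b ≤ fuel + t →
      pvSeenSpec p1 ord_p2 s1 s2 h1 h2 x0 seenT true t →
      pvSeenSpec p1 ord_p2 s1 s2 h1 h2 x0 seenF false t →
      ftLoopA p1 ord_p2 s1 s2 h1 h2 fuel seenT seenF (pvOrbit p1 ord_p2 s1 s2 h1 h2 x0 t).1 (pvOrbit p1 ord_p2 s1 s2 h1 h2 x0 t).2 = false := by
  intro fuel
  induction fuel with
  | zero => intro t seenT seenF ht hfuel _ _; omega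
  | succ m ih =>
    intro t seenT seenF ht hfuel hsT hsF
    simp only [ftLoopA]
    have h0 : ¬ (pvOrbit p1 ord_p2 s1 s2 h1 h2 x0 t).1 = 0 := hnz t ht
    rw [if_neg h0]
    cases hpar : (pvOrbit p1 ord_p2 s1 s2 h1 h2 x0 t).2 with
    | false =>
      have hstep : pvOrbit p1 ord_p2 s1 s2 h1 h2 x0 (t + 1)
          = (lookupA ord_p2 p1 s2 h2 (pvOrbit p1 ord_p2 s1 s2 h1 h2 x0 t).1, true) := by
        rw [pvOrbit_succ]; unfold pvStep; rw [hpar]; simp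
      rw [if_neg Bool.false_ne_true]
      set nn := lookupA ord_p2 p1 s2 h2 (pvOrbit p1 ord_p2 s1 s2 h1 h2 x0 t).1 with hnn
      by_cases hhit : t + 1 = b
      · -- the repeated state: the old occurrence at time a is already in seenT
        have hmem : nn ∈ seenT := by
          refine (hsT nn).mpr ⟨a, by omega, ?_⟩
          rw [heq, ← hhit, hstep]
        rw [if_pos ((PySem.Set.contains_iff seenT nn).mpr hmem)]
      · have hnotmem : nn ∉ seenT := by
          intro hm
          obtain ⟨j, hj, hje⟩ := (hsT nn).mp hm
          exact hmin (t + 1) (by omega) j (by omega) (by rw [hje, hstep])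
        rw [if_neg (by intro hc; exact hnotmem ((PySem.Set.contains_iff seenT nn).mp hc))]
        have hsT' : pvSeenSpec p1 ord_p2 s1 s2 h1 h2 x0 (PySem.Set.add seenT nn) true (t + 1) := by
          intro x
          rw [PySem.Set.mem_add]
          constructor
          · rintro (hx | rfl)
            · obtain ⟨j, hj, hje⟩ := (hsT x).mp hx; exact ⟨j, by omega, hje⟩
            · exact ⟨t + 1, le_refl _, by rw [hstep]⟩
          · rintro ⟨j, hj, hje⟩
            rcases Nat.lt_or_ge j (t + 1) with hlt | hge
            · exact Or.inl ((hsT x).mpr ⟨j, by omega, hje⟩)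
            · have hj1 : j = t + 1 := by omega
              subst hj1
              rw [hstep] at hje
              exact Or.inr (by injection hje with e1 e2; exact e1.symm)
        have hsF' : pvSeenSpec p1 ord_p2 s1 s2 h1 h2 x0 seenF false (t + 1) := by
          intro x
          rw [hsF x]
          constructor
          · rintro ⟨j, hj, hje⟩; exact ⟨j, by omega, hje⟩
          · rintro ⟨j, hj, hje⟩
            rcases Nat.lt_or_ge j (t + 1) with hlt | hge
            · exact ⟨j, by omega, hje⟩
            · have hj1 : j = t + 1 := by omega
              subst hj1
              rw [hstep] at hje
              exact absurd hje (by simp)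
        have hrec := ih (t + 1) (PySem.Set.add seenT nn) seenF (by omega) (by omega) hsT' hsF'
        rw [hstep] at hrec
        simpa using hrec
    | true =>
      have hstep : pvOrbit p1 ord_p2 s1 s2 h1 h2 x0 (t + 1)
          = (lookup_2A s1 h1 (pvOrbit p1 ord_p2 s1 s2 h1 h2 x0 t).1, false) := by
        rw [pvOrbit_succ]; unfold pvStep; rw [hpar]; simp
      rw [if_pos rfl]
      set nn := lookup_2A s1 h1 (pvOrbit p1 ord_p2 s1 s2 h1 h2 x0 t).1 with hnn
      by_cases hhit : t + 1 = b
      · have hmem : nn ∈ seenF := by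
          refine (hsF nn).mpr ⟨a, by omega, ?_⟩
          rw [heq, ← hhit, hstep]
        rw [if_pos ((PySem.Set.contains_iff seenF nn).mpr hmem)]
      · have hnotmem : nn ∉ seenF := by
          intro hm
          obtain ⟨j, hj, hje⟩ := (hsF nn).mp hm
          exact hmin (t + 1) (by omega) j (by omega) (by rw [hje, hstep])
        rw [if_neg (by intro hc; exact hnotmem ((PySem.Set.contains_iff seenF nn).mp hc))]
        have hsF' : pvSeenSpec p1 ord_p2 s1 s2 h1 h2 x0 (PySem.Set.add seenF nn) false (t + 1) := by
          intro x
          rw [PySem.Set.mem_add]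
          constructor
          · rintro (hx | rfl)
            · obtain ⟨j, hj, hje⟩ := (hsF x).mp hx; exact ⟨j, by omega, hje⟩
            · exact ⟨t + 1, le_refl _, by rw [hstep]⟩
          · rintro ⟨j, hj, hje⟩
            rcases Nat.lt_or_ge j (t + 1) with hlt | hge
            · exact Or.inl ((hsF x).mpr ⟨j, by omega, hje⟩)
            · have hj1 : j = t + 1 := by omega
              subst hj1
              rw [hstep] at hje
              exact Or.inr (by injection hje with e1 e2; exact e1.symm)
        have hsT' : pvSeenSpec p1 ord_p2 s1 s2 h1 h2 x0 seenT true (t + 1) := by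
          intro x
          rw [hsT x]
          constructor
          · rintro ⟨j, hj, hje⟩; exact ⟨j, by omega, hje⟩
          · rintro ⟨j, hj, hje⟩
            rcases Nat.lt_or_ge j (t + 1) with hlt | hge
            · exact ⟨j, by omega, hje⟩
            · have hj1 : j = t + 1 := by omega
              subst hj1
              rw [hstep] at hje
              exact absurd hje (by simp)
        have hrec := ih (t + 1) seenT (PySem.Set.add seenF nn) (by omega) (by omega) hsT' hsF'
        rw [hstep] at hrec
        simpa using hrec

-- B's loop decides "the orbit reaches 0 within fuel more rounds"
lemma runB (p1 ord_p2 : Int) (s1 s2 : List Int) (h1 h2 : Int) (x0 : Int × Bool) :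
    ∀ fuel t,
      (ftLoopB p1 ord_p2 s1 s2 h1 h2 fuel (pvOrbit p1 ord_p2 s1 s2 h1 h2 x0 t).1 (pvOrbit p1 ord_p2 s1 s2 h1 h2 x0 t).2 = true
        ↔ ∃ u, t ≤ u ∧ u ≤ t + fuel ∧ (pvOrbit p1 ord_p2 s1 s2 h1 h2 x0 u).1 = 0) := by
  intro fuel
  induction fuel with
  | zero =>
    intro t
    simp only [ftLoopB, Nat.add_zero, decide_eq_true_eq]
    constructor
    · intro h; exact ⟨t, le_refl t, le_refl t, h⟩
    · rintro ⟨u, hu1, hu2, hz⟩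
      have : u = t := by omega
      exact this ▸ hz
  | succ m ih =>
    intro t
    simp only [ftLoopB]
    by_cases h0 : (pvOrbit p1 ord_p2 s1 s2 h1 h2 x0 t).1 = 0
    · simp only [h0]
      constructor
      · intro _; exact ⟨t, le_refl t, by omega, h0⟩
      · intro _; simp
    · cases hpar : (pvOrbit p1 ord_p2 s1 s2 h1 h2 x0 t).2 with
      | false =>
        have hstep : pvOrbit p1 ord_p2 s1 s2 h1 h2 x0 (t + 1)
            = (lookupA ord_p2 p1 s2 h2 (pvOrbit p1 ord_p2 s1 s2 h1 h2 x0 t).1, true) := by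
          rw [pvOrbit_succ]; unfold pvStep; rw [hpar]; simp
        have hrec := ih (t + 1)
        rw [hstep] at hrec
        dsimp only at hrec
        rw [show (t + 1 + m) = t + (m + 1) from by omega] at hrec
        rw [if_neg h0, if_neg Bool.false_ne_true, hrec]
        constructor
        · rintro ⟨u, hu1, hu2, hz⟩; exact ⟨u, by omega, hu2, hz⟩
        · rintro ⟨u, hu1, hu2, hz⟩
          refine ⟨u, ?_, hu2, hz⟩
          rcases Nat.lt_or_ge u (t + 1) with hlt | hge
          · have hut : u = t := by omega
            subst hut
            exact absurd hz h0
          · omega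
      | true =>
        have hstep : pvOrbit p1 ord_p2 s1 s2 h1 h2 x0 (t + 1)
            = (lookup_2A s1 h1 (pvOrbit p1 ord_p2 s1 s2 h1 h2 x0 t).1, false) := by
          rw [pvOrbit_succ]; unfold pvStep; rw [hpar]; simp
        have hrec := ih (t + 1)
        rw [hstep] at hrec
        dsimp only at hrec
        rw [show (t + 1 + m) = t + (m + 1) from by omega] at hrec
        rw [if_neg h0, if_pos rfl, hrec]
        constructor
        · rintro ⟨u, hu1, hu2, hz⟩; exact ⟨u, by omega, hu2, hz⟩
        · rintro ⟨u, hu1, hu2, hz⟩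
          refine ⟨u, ?_, hu2, hz⟩
          rcases Nat.lt_or_ge u (t + 1) with hlt | hge
          · have hut : u = t := by omega
            subst hut
            exact absurd hz h0
          · omega

-- ===== VERDICT (by name: the statement is the Claim_ definition above) =====
theorem full_trace_2_spec : Claim_equal_full_trace_2 := by
  intro p1 ord_p2 sequence1 sequence2 shift1 shift2 number current_string hdom hpre
  unfold Spec_full_trace_2 full_trace_2 full_trace_2_alt
  have hsT0 : pvSeenSpec p1 ord_p2 sequence1 sequence2 shift1 shift2 (number, decide (current_string = 1))
      (if decide (current_string = 1) = true then PySem.Set.add PySem.Set.empty number else PySem.Set.empty) true 0 := by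
    by_cases hcs : current_string = 1
    · rw [if_pos (by simp [hcs])]
      intro x
      rw [PySem.Set.mem_add]
      constructor
      · rintro (hx | rfl)
        · exact absurd hx (List.not_mem_nil)
        · exact ⟨0, le_refl 0, by simp [pvOrbit, hcs]⟩
      · rintro ⟨j, hj, hje⟩
        have hj0 : j = 0 := Nat.le_zero.mp hj
        subst hj0
        have he : (number, decide (current_string = 1)) = (x, true) := hje
        injection he with e1 e2
        exact Or.inr e1.symm
    · rw [if_neg (by simp [hcs])]
      intro x
      constructor
      · intro hx; exact absurd hx (List.not_mem_nil)
      · rintro ⟨j, hj, hje⟩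
        have hj0 : j = 0 := Nat.le_zero.mp hj
        subst hj0
        have he : (number, decide (current_string = 1)) = (x, true) := hje
        injection he with e1 e2
        exact absurd e2 (by simp [hcs])
  have hsF0 : pvSeenSpec p1 ord_p2 sequence1 sequence2 shift1 shift2 (number, decide (current_string = 1))
      (if decide (current_string = 1) = true then PySem.Set.empty else PySem.Set.add PySem.Set.empty number) false 0 := by
    by_cases hcs : current_string = 1
    · rw [if_pos (by simp [hcs])]
      intro x
      constructor
      · intro hx; exact absurd hx (List.not_mem_nil)
      · rintro ⟨j, hj, hje⟩
        have hj0 : j = 0 := Nat.le_zero.mp hj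
        subst hj0
        have he : (number, decide (current_string = 1)) = (x, false) := hje
        injection he with e1 e2
        exact absurd e2 (by simp [hcs])
    · rw [if_neg (by simp [hcs])]
      intro x
      rw [PySem.Set.mem_add]
      constructor
      · rintro (hx | rfl)
        · exact absurd hx (List.not_mem_nil)
        · exact ⟨0, le_refl 0, by simp [pvOrbit, hcs]⟩
      · rintro ⟨j, hj, hje⟩
        have hj0 : j = 0 := Nat.le_zero.mp hj
        subst hj0
        have he : (number, decide (current_string = 1)) = (x, false) := hje
        injection he with e1 e2
        exact Or.inr e1.symm
  by_cases H : ∃ u, u ≤ sequence1.length + sequence2.length + 6 ∧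
      (pvOrbit p1 ord_p2 sequence1 sequence2 shift1 shift2 (number, decide (current_string = 1)) u).1 = 0
  · -- the orbit reaches 0: both sides are true
    obtain ⟨w, hwK, hw0⟩ := H
    have hex : ∃ u, (pvOrbit p1 ord_p2 sequence1 sequence2 shift1 shift2 (number, decide (current_string = 1)) u).1 = 0 := ⟨w, hw0⟩
    have hz := Nat.find_spec hex
    have hu0K : Nat.find hex ≤ sequence1.length + sequence2.length + 6 := le_trans (Nat.find_min' hex hw0) hwK
    have hdist : ∀ a b, a < b → b ≤ Nat.find hex →
        pvOrbit p1 ord_p2 sequence1 sequence2 shift1 shift2 (number, decide (current_string = 1)) a ≠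
        pvOrbit p1 ord_p2 sequence1 sequence2 shift1 shift2 (number, decide (current_string = 1)) b := by
      intro a b hab hb heq'
      have hper := pvOrbit_periodic p1 ord_p2 sequence1 sequence2 shift1 shift2 (number, decide (current_string = 1)) (le_of_lt hab) heq'
      have h2 : a ≤ Nat.find hex - (b - a) := by omega
      have h3 := hper (Nat.find hex - (b - a)) h2
      rw [show Nat.find hex - (b - a) + (b - a) = Nat.find hex from by omega] at h3
      rw [h3] at hz
      exact absurd hz (Nat.find_min hex (show Nat.find hex - (b - a) < Nat.find hex from by omega))
    have hA := runA_true p1 ord_p2 sequence1 sequence2 shift1 shift2 (number, decide (current_string = 1))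
      (Nat.find hex) hz hdist (sequence1.length + sequence2.length + 8) 0 _ _ (Nat.zero_le _) (by omega) hsT0 hsF0
    have hB := (runB p1 ord_p2 sequence1 sequence2 shift1 shift2 (number, decide (current_string = 1))
      (sequence1.length + sequence2.length + 6) 0).mpr ⟨w, Nat.zero_le _, by omega, hw0⟩
    exact hA.trans hB.symm
  · -- the orbit never reaches 0 within the bound: a state repeats and both sides are false
    have hB : ftLoopB p1 ord_p2 sequence1 sequence2 shift1 shift2 (sequence1.length + sequence2.length + 6) number (decide (current_string = 1)) = false := by
      cases hb : ftLoopB p1 ord_p2 sequence1 sequence2 shift1 shift2 (sequence1.length + sequence2.length + 6) number (decide (current_string = 1)) with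
      | false => rfl
      | true =>
        obtain ⟨u, _, hu2, huz⟩ := (runB p1 ord_p2 sequence1 sequence2 shift1 shift2 (number, decide (current_string = 1))
          (sequence1.length + sequence2.length + 6) 0).mp hb
        exact absurd (⟨u, by omega, huz⟩ :
          ∃ u, u ≤ sequence1.length + sequence2.length + 6 ∧
            (pvOrbit p1 ord_p2 sequence1 sequence2 shift1 shift2 (number, decide (current_string = 1)) u).1 = 0) H
    have hlen : (pvStates sequence1 sequence2 shift1 shift2).length = sequence1.length + sequence2.length + 6 := by
      simp [pvStates, pvC1, pvC2, pvCandLoop]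
      omega
    have hcard : (pvStates sequence1 sequence2 shift1 shift2).toFinset.card
        < (Finset.Icc 1 (sequence1.length + sequence2.length + 6 + 1)).card := by
      have h1 := List.toFinset_card_le (pvStates sequence1 sequence2 shift1 shift2)
      rw [Nat.card_Icc]
      omega
    have hmaps : ∀ u ∈ Finset.Icc 1 (sequence1.length + sequence2.length + 6 + 1),
        pvOrbit p1 ord_p2 sequence1 sequence2 shift1 shift2 (number, decide (current_string = 1)) u
          ∈ (pvStates sequence1 sequence2 shift1 shift2).toFinset := by
      intro u hu
      exact List.mem_toFinset.mpr (pvOrbit_mem p1 ord_p2 sequence1 sequence2 shift1 shift2 _ u (Finset.mem_Icc.mp hu).1)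
    obtain ⟨u, hu, v, hv, huv, he⟩ := Finset.exists_ne_map_eq_of_card_lt_of_maps_to hcard hmaps
    obtain ⟨aa, bb, haab, habeq, hbbK⟩ : ∃ a b, a < b ∧
        pvOrbit p1 ord_p2 sequence1 sequence2 shift1 shift2 (number, decide (current_string = 1)) a =
        pvOrbit p1 ord_p2 sequence1 sequence2 shift1 shift2 (number, decide (current_string = 1)) b ∧
        b ≤ sequence1.length + sequence2.length + 6 + 1 := by
      rcases Nat.lt_or_gt_of_ne huv with h | h
      · exact ⟨u, v, h, he, (Finset.mem_Icc.mp hv).2⟩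
      · exact ⟨v, u, h, he.symm, (Finset.mem_Icc.mp hu).2⟩
    haveI : DecidablePred (fun y => ∃ x, x < y ∧
        pvOrbit p1 ord_p2 sequence1 sequence2 shift1 shift2 (number, decide (current_string = 1)) x =
        pvOrbit p1 ord_p2 sequence1 sequence2 shift1 shift2 (number, decide (current_string = 1)) y) :=
      Classical.decPred _
    have hexP : ∃ y, ∃ x, x < y ∧
        pvOrbit p1 ord_p2 sequence1 sequence2 shift1 shift2 (number, decide (current_string = 1)) x =
        pvOrbit p1 ord_p2 sequence1 sequence2 shift1 shift2 (number, decide (current_string = 1)) y :=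
      ⟨bb, aa, haab, habeq⟩
    obtain ⟨a0, ha0, heq0⟩ := Nat.find_spec hexP
    have hb0 : Nat.find hexP ≤ bb := Nat.find_min' hexP ⟨aa, haab, habeq⟩
    have hmin : ∀ y, y < Nat.find hexP → ∀ x, x < y →
        pvOrbit p1 ord_p2 sequence1 sequence2 shift1 shift2 (number, decide (current_string = 1)) x ≠
        pvOrbit p1 ord_p2 sequence1 sequence2 shift1 shift2 (number, decide (current_string = 1)) y :=
      fun y hy x hx hxy => Nat.find_min hexP hy ⟨x, hx, hxy⟩
    have hnz : ∀ j, j < Nat.find hexP →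
        (pvOrbit p1 ord_p2 sequence1 sequence2 shift1 shift2 (number, decide (current_string = 1)) j).1 ≠ 0 :=
      fun j hj hjz => H ⟨j, by omega, hjz⟩
    have hA := runA_false p1 ord_p2 sequence1 sequence2 shift1 shift2 (number, decide (current_string = 1))
      a0 (Nat.find hexP) ha0 heq0 hmin hnz (sequence1.length + sequence2.length + 8) 0 _ _ (by omega) (by omega) hsT0 hsF0
    exact hA.trans hB.symm
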